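-- pv_equiv track=rewrite | github.com/Rhn12/BaekJoon | 백준/Gold/1206. 사람의 수/사람의 수.py | is_possible_count
-- ===== SOURCE A (Python) =====
-- def is_possible_count(cnt_of_people, averages):
--     for avg in averages:
--         left = 0
--         right = 10 * cnt_of_people
--         is_possible = False
--         while left <= right:
--             sum_of_score = (left + right) // 2
--             current_avg = (sum_of_score * 1000) // cnt_of_people
--             if current_avg == avg:
--                 if current_avg > 10 * 1000:
--                     continue
--                 is_possible = True
--                 break
--             elif current_avg > avg:
--                 right = sum_of_score - 1
--             else:
--                 left = sum_of_score + 1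
--         if not is_possible:
--             return False
--     return True
-- ===== SOURCE B (Python) =====
-- def is_possible_count(cnt_of_people, averages):
--     n = cnt_of_people
--     for avg in averages:
--         if n <= 0:
--             return False
--         lo = -((-avg * n) // 1000)                  # smallest sum with floor(sum*1000/n) >= avg
--         hi = -((-(avg + 1) * n) // 1000) - 1        # largest sum with floor(sum*1000/n) <= avg
--         if max(lo, 0) > min(hi, 10 * n):
--             return False
--     return True
-- ===== Notes on version B (the rewrite author's own statement) =====
-- stated objective: simpler
-- what changed: Replaces the per-average binary search over candidate score sums with a closed-form check that the integer interval [ceil(avg*n/1000), ceil((avg+1)*n/1000)-1] meets [0, 10*n].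
import Mathlib
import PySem

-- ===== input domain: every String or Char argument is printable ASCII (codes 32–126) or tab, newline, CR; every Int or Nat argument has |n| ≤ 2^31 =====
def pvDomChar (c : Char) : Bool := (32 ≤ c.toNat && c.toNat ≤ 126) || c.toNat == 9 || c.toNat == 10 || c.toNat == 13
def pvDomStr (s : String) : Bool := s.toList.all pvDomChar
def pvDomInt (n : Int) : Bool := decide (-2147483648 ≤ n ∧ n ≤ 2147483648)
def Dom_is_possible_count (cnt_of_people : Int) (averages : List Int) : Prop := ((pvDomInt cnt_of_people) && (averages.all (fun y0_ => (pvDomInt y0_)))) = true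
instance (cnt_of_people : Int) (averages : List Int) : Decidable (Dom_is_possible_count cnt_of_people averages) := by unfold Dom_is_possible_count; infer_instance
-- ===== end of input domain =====

-- B replaces A's per-average binary search by a closed-form interval check; on
-- cnt_of_people = 0 with nonempty averages A raises ZeroDivisionError (outside Pre_).

-- ===== PORT A =====
-- A's while-loop; fuel only makes the recursion total (Python's loop state is (left, right)).
def pvLoopA (cnt avg : Int) : Nat → Int → Int → Bool
  | 0, _, _ => false
  | fuel + 1, left, right =>
    if left ≤ right then
      let sum_of_score := PySem.Int.floordiv (left + right) 2
      let current_avg := PySem.Int.floordiv (sum_of_score * 1000) cnt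
      if current_avg = avg then
        if current_avg > 10 * 1000 then pvLoopA cnt avg fuel left right  -- 'continue' (state unchanged)
        else true
      else if current_avg > avg then pvLoopA cnt avg fuel left (sum_of_score - 1)
      else pvLoopA cnt avg fuel (sum_of_score + 1) right
    else false

def is_possible_count (cnt_of_people : Int) (averages : List Int) : Bool :=
  match averages with
  | [] => true
  | avg :: rest =>
    if pvLoopA cnt_of_people avg (10 * cnt_of_people + 2).toNat 0 (10 * cnt_of_people) then
      is_possible_count cnt_of_people rest
    else false

-- ===== PORT B =====
def is_possible_count_alt (cnt_of_people : Int) (averages : List Int) : Bool :=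
  match averages with
  | [] => true
  | avg :: rest =>
    if cnt_of_people ≤ 0 then false
    else
      let lo := -(PySem.Int.floordiv (-avg * cnt_of_people) 1000)
      let hi := -(PySem.Int.floordiv (-(avg + 1) * cnt_of_people) 1000) - 1
      if max lo 0 > min hi (10 * cnt_of_people) then false
      else is_possible_count_alt cnt_of_people rest

-- ===== PRECONDITION & SPEC =====
-- Pre_ excludes only cnt_of_people = 0 with a nonempty list, where A raises ZeroDivisionError.
def Pre_is_possible_count (cnt_of_people : Int) (averages : List Int) : Prop :=
  cnt_of_people ≠ 0 ∨ averages = []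
instance (cnt_of_people : Int) (averages : List Int) : Decidable (Pre_is_possible_count cnt_of_people averages) := by unfold Pre_is_possible_count; infer_instance
def pvWitness_is_possible_count : Int × List Int := (3, [3333, 0, 10000])

def Spec_is_possible_count (cnt_of_people : Int) (averages : List Int) (out : Bool) : Prop := out = is_possible_count_alt cnt_of_people averages
instance (cnt_of_people : Int) (averages : List Int) (out : Bool) : Decidable (Spec_is_possible_count cnt_of_people averages out) := by unfold Spec_is_possible_count; infer_instance

-- ===== CLAIM (what is proved, stated in full; the proofs are below) =====
def Claim_equal_is_possible_count : Prop := ∀ (cnt_of_people : Int) (averages : List Int), Dom_is_possible_count cnt_of_people averages → Pre_is_possible_count cnt_of_people averages → Spec_is_possible_count cnt_of_people averages (is_possible_count cnt_of_people averages)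

-- ===== LEMMAS AND PROOFS =====

-- f s = floor(s*1000/n) is monotone for n > 0
theorem pvMono (n : Int) (hn : 0 < n) (a b : Int) (h : a ≤ b) :
    PySem.Int.floordiv (a * 1000) n ≤ PySem.Int.floordiv (b * 1000) n := by
  rw [PySem.Int.floordiv_eq_ediv_of_pos hn, PySem.Int.floordiv_eq_ediv_of_pos hn]
  exact Int.ediv_le_ediv hn (by nlinarith)

-- binary-search correctness: with enough fuel, the loop decides membership of avg in f[[left,right]]
theorem pvLoopA_correct (n avg : Int) (hn : 0 < n) :
    ∀ (fuel : Nat) (left right : Int), (right - left + 1).toNat < fuel →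
      0 ≤ left → right ≤ 10 * n →
      (pvLoopA n avg fuel left right = true ↔
        ∃ s, left ≤ s ∧ s ≤ right ∧ PySem.Int.floordiv (s * 1000) n = avg) := by
  intro fuel
  induction fuel with
  | zero => intro left right hf _ _; omega
  | succ fuel ih =>
    intro left right hf hl hr
    by_cases hlr : left ≤ right
    · obtain ⟨hm1, hm2⟩ := PySem.Int.floordiv_two_mid_bounds hlr
      have hcurle : PySem.Int.floordiv (PySem.Int.floordiv (left + right) 2 * 1000) n < 10001 := by
        rw [PySem.Int.floordiv_lt_iff_lt_mul hn]
        nlinarith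
      simp only [pvLoopA, if_pos hlr]
      by_cases heq : PySem.Int.floordiv (PySem.Int.floordiv (left + right) 2 * 1000) n = avg
      · rw [if_pos heq, if_neg (by omega)]
        simp only [true_iff]
        exact ⟨PySem.Int.floordiv (left + right) 2, hm1, hm2, heq⟩
      · rw [if_neg heq]
        by_cases hgt : PySem.Int.floordiv (PySem.Int.floordiv (left + right) 2 * 1000) n > avg
        · rw [if_pos hgt, ih left (PySem.Int.floordiv (left + right) 2 - 1) (by omega) hl (by omega)]
          constructor
          · rintro ⟨s, h1, h2, h3⟩; exact ⟨s, h1, by omega, h3⟩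
          · rintro ⟨s, h1, h2, h3⟩
            refine ⟨s, h1, ?_, h3⟩
            by_contra hcon
            have := pvMono n hn (PySem.Int.floordiv (left + right) 2) s (by omega)
            omega
        · rw [if_neg hgt, ih (PySem.Int.floordiv (left + right) 2 + 1) right (by omega) (by omega) hr]
          constructor
          · rintro ⟨s, h1, h2, h3⟩; exact ⟨s, by omega, h2, h3⟩
          · rintro ⟨s, h1, h2, h3⟩
            refine ⟨s, ?_, h2, h3⟩
            by_contra hcon
            have := pvMono n hn s (PySem.Int.floordiv (left + right) 2) (by omega)
            omega
    · simp only [pvLoopA, if_neg hlr, Bool.false_eq_true, false_iff, not_exists]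
      intro s h
      omega

-- closed-form interval check equals membership of avg in f[[0,10n]]
theorem pvInterval (n avg : Int) (hn : 0 < n) :
    ((∃ s, 0 ≤ s ∧ s ≤ 10 * n ∧ PySem.Int.floordiv (s * 1000) n = avg) ↔
      ¬ (max (-(PySem.Int.floordiv (-avg * n) 1000)) 0 >
          min (-(PySem.Int.floordiv (-(avg + 1) * n) 1000) - 1) (10 * n))) := by
  have h1000 : (0:Int) < 1000 := by norm_num
  have hL : (-(PySem.Int.floordiv (-avg * n) 1000) - 1) * 1000 < avg * n ∧
      avg * n ≤ -(PySem.Int.floordiv (-avg * n) 1000) * 1000 := by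
    have := (PySem.Int.neg_floordiv_neg_eq_iff_of_pos (a := avg * n)
      (q := -(PySem.Int.floordiv (-avg * n) 1000)) h1000).mp (by rw [neg_mul])
    omega
  have hH : (-(PySem.Int.floordiv (-(avg + 1) * n) 1000) - 1) * 1000 < (avg + 1) * n ∧
      (avg + 1) * n ≤ -(PySem.Int.floordiv (-(avg + 1) * n) 1000) * 1000 := by
    have := (PySem.Int.neg_floordiv_neg_eq_iff_of_pos (a := (avg + 1) * n)
      (q := -(PySem.Int.floordiv (-(avg + 1) * n) 1000)) h1000).mp (by rw [neg_mul])
    omega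
  have hplus : (avg + 1) * n = avg * n + n := by ring
  constructor
  · rintro ⟨s, h0, h10, hs⟩
    obtain ⟨hs1, hs2⟩ := (PySem.Int.floordiv_eq_iff_of_pos hn).mp hs
    rcases max_cases (-(PySem.Int.floordiv (-avg * n) 1000)) 0 with ⟨hm, _⟩ | ⟨hm, _⟩ <;>
      rcases min_cases (-(PySem.Int.floordiv (-(avg + 1) * n) 1000) - 1) (10 * n) with
        ⟨hmin, _⟩ | ⟨hmin, _⟩ <;> omega
  · intro hle
    refine ⟨max (-(PySem.Int.floordiv (-avg * n) 1000)) 0, le_max_right _ _, ?_, ?_⟩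
    · rcases max_cases (-(PySem.Int.floordiv (-avg * n) 1000)) 0 with ⟨hm, _⟩ | ⟨hm, _⟩ <;>
        rcases min_cases (-(PySem.Int.floordiv (-(avg + 1) * n) 1000) - 1) (10 * n) with
          ⟨hmin, _⟩ | ⟨hmin, _⟩ <;> omega
    · rw [PySem.Int.floordiv_eq_iff_of_pos hn]
      rcases max_cases (-(PySem.Int.floordiv (-avg * n) 1000)) 0 with ⟨hm, _⟩ | ⟨hm, _⟩ <;>
        rcases min_cases (-(PySem.Int.floordiv (-(avg + 1) * n) 1000) - 1) (10 * n) with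
          ⟨hmin, _⟩ | ⟨hmin, _⟩ <;> omega

-- per-average agreement of the two checks (n > 0)
theorem pvStep (n avg : Int) (hn : 0 < n) :
    pvLoopA n avg (10 * n + 2).toNat 0 (10 * n) =
      !(max (-(PySem.Int.floordiv (-avg * n) 1000)) 0 >
          min (-(PySem.Int.floordiv (-(avg + 1) * n) 1000) - 1) (10 * n)) := by
  have h1 := pvLoopA_correct n avg hn ((10 * n + 2).toNat) 0 (10 * n) (by omega) le_rfl le_rfl
  have h2 := pvInterval n avg hn
  by_cases hc : max (-(PySem.Int.floordiv (-avg * n) 1000)) 0 >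
      min (-(PySem.Int.floordiv (-(avg + 1) * n) 1000) - 1) (10 * n)
  · simp only [hc, decide_true, Bool.not_true]
    rw [Bool.eq_false_iff]
    intro h; exact (h2.mp (h1.mp h)) hc
  · simp only [hc, decide_false, Bool.not_false]
    exact h1.mpr (h2.mpr hc)

-- ===== VERDICT (by name: the statement is the Claim_ definition above) =====
theorem is_possible_count_spec : Claim_equal_is_possible_count := by
  intro n l hdom hpre
  unfold Spec_is_possible_count
  induction l with
  | nil => rfl
  | cons avg rest ih =>
    have hn : n ≠ 0 := by
      rcases hpre with h | h
      · exact h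
      · exact absurd h (by simp)
    have hdom' : Dom_is_possible_count n rest := by
      unfold Dom_is_possible_count at hdom ⊢
      simp only [List.all_cons, Bool.and_eq_true] at hdom ⊢
      exact ⟨hdom.1, hdom.2.2⟩
    have ihr := ih hdom' (Or.inl hn)
    by_cases hpos : 0 < n
    · simp only [is_possible_count, is_possible_count_alt]
      rw [if_neg (by omega : ¬ n ≤ 0), pvStep n avg hpos]
      by_cases hc : max (-(PySem.Int.floordiv (-avg * n) 1000)) 0 >
          min (-(PySem.Int.floordiv (-(avg + 1) * n) 1000) - 1) (10 * n)
      · rw [if_pos hc, if_neg (by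
          simp only [Bool.not_eq_true', decide_eq_false_iff_not, not_not]; exact hc)]
      · rw [if_neg hc, if_pos (by
          simp only [Bool.not_eq_true', decide_eq_false_iff_not]; exact hc), ihr]
    · have hneg : 10 * n + 2 ≤ 0 := by omega
      simp only [is_possible_count, is_possible_count_alt,
        Int.toNat_of_nonpos hneg, if_pos (by omega : n ≤ 0)]
      rfl
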